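-- pv_equiv track=rewrite | github.com/Hima9791/ACC | AAC.py | process_unit_token_no_paren
-- ===== SOURCE A (Python) =====
-- def process_unit_token_no_paren(token, base_units, multipliers_dict):
--     if token.startswith('$'):
--         after = token[1:]
--         stripped = after.strip()
--         if stripped == "":
--             return "$"
--         if stripped in base_units:
--             return "$" + after
--         for prefix in sorted(multipliers_dict.keys(), key=len, reverse=True):
--             if stripped.startswith(prefix):
--                 possible = stripped[len(prefix):]
--                 if possible in base_units:
--                     idx = after.find(prefix)
--                     if idx != -1:
--                         if idx == 1 and after[0] == " ":
--                             preserved = after[:0] + after[idx + len(prefix):]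
--                         else:
--                             preserved = after[:idx] + after[idx + len(prefix):]
--                         return "$" + preserved
--         return f"Error: Undefined unit '{stripped}' (no recognized prefix)"
--     else:
--         stripped = token.strip()
--         if stripped in base_units:
--             return "$" + stripped
--         for prefix in sorted(multipliers_dict.keys(), key=len, reverse=True):
--             if stripped.startswith(prefix):
--                 possible = stripped[len(prefix):]
--                 if possible in base_units:
--                     idx = token.find(prefix)
--                     if idx != -1:
--                         if idx > 0 and token[idx-1] == " ":
--                             if idx == 1:
--                                 preserved = token[:0] + token[idx + len(prefix):]
--                             else:
--                                 preserved = token[:idx] + token[idx + len(prefix):]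
--                         else:
--                             preserved = token[:idx] + token[idx + len(prefix):]
--                         return "$" + preserved
--         return f"Error: Undefined unit '{stripped}' (no recognized prefix)"
-- ===== SOURCE B (Python) =====
-- def _finish(src, stripped, base_units, multipliers_dict):
--     top = min(len(stripped), max(map(len, multipliers_dict), default=0))
--     for L in range(top, -1, -1):
--         cand = stripped[:L]
--         if cand in multipliers_dict and stripped[L:] in base_units:
--             idx = src.find(cand)
--             if idx != -1:
--                 if idx == 1 and src[0] == " ":
--                     return "$" + src[idx + L:]
--                 return "$" + src[:idx] + src[idx + L:]
--     return f"Error: Undefined unit '{stripped}' (no recognized prefix)"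
--
--
-- def process_unit_token_no_paren(token, base_units, multipliers_dict):
--     if token.startswith('$'):
--         src = token[1:]
--         stripped = src.strip()
--         if stripped == "":
--             return "$"
--         if stripped in base_units:
--             return "$" + src
--         return _finish(src, stripped, base_units, multipliers_dict)
--     else:
--         stripped = token.strip()
--         if stripped in base_units:
--             return "$" + stripped
--         return _finish(token, stripped, base_units, multipliers_dict)
-- ===== Notes on version B (the rewrite author's own statement) =====
-- stated objective: alternative
-- what changed: B removes A's sort-all-dict-keys-then-startswith scan (duplicated in both branches) entirely: a single shared helper counts a candidate prefix length down from min(len(stripped), max key length) to 0 and tests stripped[:L] by direct dict membership, with one unified reconstruction replacing A's two near-duplicate special-case blocks.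
import Mathlib
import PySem

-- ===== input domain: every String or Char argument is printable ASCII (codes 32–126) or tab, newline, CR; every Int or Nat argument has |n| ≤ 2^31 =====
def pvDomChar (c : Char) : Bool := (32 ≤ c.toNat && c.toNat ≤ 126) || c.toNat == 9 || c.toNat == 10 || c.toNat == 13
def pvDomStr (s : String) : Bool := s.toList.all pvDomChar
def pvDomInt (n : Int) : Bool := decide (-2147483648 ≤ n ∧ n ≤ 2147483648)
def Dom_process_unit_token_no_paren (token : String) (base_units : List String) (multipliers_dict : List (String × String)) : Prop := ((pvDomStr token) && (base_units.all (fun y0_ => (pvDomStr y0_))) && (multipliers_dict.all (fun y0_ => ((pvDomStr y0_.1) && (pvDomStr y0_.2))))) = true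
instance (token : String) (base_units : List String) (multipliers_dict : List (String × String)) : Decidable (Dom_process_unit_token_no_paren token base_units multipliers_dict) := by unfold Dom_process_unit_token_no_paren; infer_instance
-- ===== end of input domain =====

-- B drops A's per-branch "sort all dict keys by length, scan with startswith" loops: it counts a
-- candidate prefix LENGTH down from len(stripped) to 0 with a direct dict-membership test per
-- length, and merges both branches' duplicated tails into one shared helper with a single
-- unified reconstruction (objective: alternative; no sorting, no key scan).

-- ===== PORT A =====

-- the error fallback string of A
def pvErr (stripped : List Char) : String :=
  String.ofList ("Error: Undefined unit '".toList ++ stripped ++ "' (no recognized prefix)".toList)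

-- A, '$' branch, loop body after the two prefix tests: idx = after.find(prefix); the
-- reconstruction of `preserved` (returns none exactly when the Python `continue`s, i.e. idx == -1)
def pvReconA1 (after p : List Char) : Option (List Char) :=
  let idx := PySem.Chars.find after p
  if idx ≠ -1 then
    some (if idx = 1 ∧ PySem.List.pyGet? after 0 = some ' ' then
            PySem.List.slice after none (some 0) ++ PySem.List.slice after (some (idx + (p.length : Int))) none
          else
            PySem.List.slice after none (some idx) ++ PySem.List.slice after (some (idx + (p.length : Int))) none)
  else none

-- A, non-'$' branch, loop body after the two prefix tests (idx = token.find(prefix))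
def pvReconA2 (tok p : List Char) : Option (List Char) :=
  let idx := PySem.Chars.find tok p
  if idx ≠ -1 then
    some (if idx > 0 ∧ PySem.List.pyGet? tok (idx - 1) = some ' ' then
            (if idx = 1 then
               PySem.List.slice tok none (some 0) ++ PySem.List.slice tok (some (idx + (p.length : Int))) none
             else
               PySem.List.slice tok none (some idx) ++ PySem.List.slice tok (some (idx + (p.length : Int))) none)
          else
            PySem.List.slice tok none (some idx) ++ PySem.List.slice tok (some (idx + (p.length : Int))) none)
  else none

-- one iteration of A's `for prefix in sorted(...)` loop: startswith test, then possible in base_units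
def pvTryA (stripped : List Char) (base : List (List Char)) (att : List Char → Option (List Char))
    (k : List Char) : Option (List Char) :=
  if PySem.Chars.startswith stripped k then
    if PySem.List.slice stripped (some (k.length : Int)) none ∈ base then att k else none
  else none

-- A's loop with its early return (some = returned `preserved`, none = fell through)
def pvLoopA (stripped : List Char) (base : List (List Char)) (att : List Char → Option (List Char)) :
    List (List Char) → Option (List Char)
  | [] => none
  | k :: ks =>
    match pvTryA stripped base att k with
    | some r => some r
    | none => pvLoopA stripped base att ks

def process_unit_token_no_paren (token : String) (base_units : List String) (multipliers_dict : List (String × String)) : String :=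
  let tok := token.toList
  let base := base_units.map String.toList
  let keys := ((PySem.Dict.ofList multipliers_dict).keys).map String.toList
  if PySem.Chars.startswith tok ['$'] then
    let after := PySem.List.slice tok (some 1) none
    let stripped := PySem.Chars.strip after
    if stripped = [] then "$"
    else if stripped ∈ base then String.ofList ('$' :: after)
    else
      match pvLoopA stripped base (pvReconA1 after)
              (PySem.List.sorted keys (fun k => k.length) true) with
      | some r => String.ofList ('$' :: r)
      | none => pvErr stripped
  else
    let stripped := PySem.Chars.strip tok
    if stripped ∈ base then String.ofList ('$' :: stripped)
    else
      match pvLoopA stripped base (pvReconA2 tok)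
              (PySem.List.sorted keys (fun k => k.length) true) with
      | some r => String.ofList ('$' :: r)
      | none => pvErr stripped

-- ===== PORT B =====

-- one step of B's countdown (`cand = stripped[:L]` tested by direct dict/base membership;
-- `src[:idx]` / `src[idx+L:]` are nonnegative slices, ported as take/drop — exact since idx ≥ 0
-- inside the `idx != -1` branch)
def pvStep (src stripped : List Char) (base keys : List (List Char)) (L : Nat) : Option (List Char) :=
  if stripped.take L ∈ keys ∧ stripped.drop L ∈ base then
    let idx := PySem.Chars.find src (stripped.take L)
    if idx ≠ -1 then
      some (if idx = 1 ∧ src.head? = some ' ' then src.drop (idx.toNat + L)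
            else src.take idx.toNat ++ src.drop (idx.toNat + L))
    else none
  else none

-- B's `for L in range(len(stripped), -1, -1)` as a structural countdown with early return
def pvScan (src stripped : List Char) (base keys : List (List Char)) : Nat → Option (List Char)
  | 0 => pvStep src stripped base keys 0
  | L + 1 =>
    match pvStep src stripped base keys (L + 1) with
    | some r => some r
    | none => pvScan src stripped base keys L

-- B's `max(map(len, multipliers_dict), default=0)`
def pvMaxL (keys : List (List Char)) : Nat :=
  keys.foldl (fun m k => max m k.length) 0

-- B's shared helper `_finish` (the countdown starts at min(len(stripped), max key length))
def pvFinish (src stripped : List Char) (base keys : List (List Char)) : String :=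
  match pvScan src stripped base keys (min stripped.length (pvMaxL keys)) with
  | some r => "$" ++ String.ofList r
  | none => "Error: Undefined unit '" ++ String.ofList stripped ++ "' (no recognized prefix)"

def process_unit_token_no_paren_alt (token : String) (base_units : List String) (multipliers_dict : List (String × String)) : String :=
  let base := base_units.map String.toList
  let keys := ((PySem.Dict.ofList multipliers_dict).keys).map String.toList
  let tok := token.toList
  if tok.head? = some '$' then
    let src := tok.tail
    let stripped := PySem.Chars.strip src
    if stripped.isEmpty then "$"
    else if stripped ∈ base then "$" ++ String.ofList src
    else pvFinish src stripped base keys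
  else
    let stripped := PySem.Chars.strip tok
    if stripped ∈ base then "$" ++ String.ofList stripped
    else pvFinish tok stripped base keys

-- ===== PRECONDITION & SPEC =====
def Spec_process_unit_token_no_paren (token : String) (base_units : List String) (multipliers_dict : List (String × String)) (out : String) : Prop := out = process_unit_token_no_paren_alt token base_units multipliers_dict
instance (token : String) (base_units : List String) (multipliers_dict : List (String × String)) (out : String) : Decidable (Spec_process_unit_token_no_paren token base_units multipliers_dict out) := by unfold Spec_process_unit_token_no_paren; infer_instance

-- ===== CLAIM (what is proved, stated in full; the proofs are below) =====
def Claim_equal_process_unit_token_no_paren : Prop := ∀ (token : String) (base_units : List String) (multipliers_dict : List (String × String)), Dom_process_unit_token_no_paren token base_units multipliers_dict → Spec_process_unit_token_no_paren token base_units multipliers_dict (process_unit_token_no_paren token base_units multipliers_dict)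

-- ===== LEMMAS AND PROOFS =====

-- B's inner reconstruction, factored out for the equivalence lemmas (not used by the ports)
def pvFix (src cand : List Char) (L : Nat) : Option (List Char) :=
  let idx := PySem.Chars.find src cand
  if idx ≠ -1 then
    some (if idx = 1 ∧ src.head? = some ' ' then src.drop (idx.toNat + L)
          else src.take idx.toNat ++ src.drop (idx.toNat + L))
  else none

theorem pvLoopA_eq_findSome (stripped : List Char) (base : List (List Char))
    (att : List Char → Option (List Char)) (ks : List (List Char)) :
    pvLoopA stripped base att ks = ks.findSome? (pvTryA stripped base att) := by
  induction ks with
  | nil => rfl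
  | cons k ks ih =>
    simp only [pvLoopA, List.findSome?_cons, ih]
    cases pvTryA stripped base att k <;> rfl

theorem pvScan_eq_findSome (src stripped : List Char) (base keys : List (List Char)) (L : Nat) :
    pvScan src stripped base keys L
      = ((List.range (L + 1)).reverse).findSome? (pvStep src stripped base keys) := by
  induction L with
  | zero => simp [pvScan, List.range_succ]
  | succ L ih =>
    rw [List.range_succ (n := L + 1)]
    simp only [List.reverse_append, List.reverse_singleton, List.singleton_append,
      List.findSome?_cons, pvScan, ih]
    cases pvStep src stripped base keys (L + 1) <;> rfl

theorem pvFindSome?_filter {α β : Type} (f : α → Option β) (p : α → Bool) (l : List α)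
    (h : ∀ x ∈ l, p x = false → f x = none) :
    l.findSome? f = (l.filter p).findSome? f := by
  induction l with
  | nil => rfl
  | cons x xs ih =>
    have ih' := ih (fun y hy => h y (List.mem_cons_of_mem _ hy))
    cases hp : p x with
    | true => simp [hp, List.findSome?_cons, ih']
    | false =>
      have hx := h x (List.mem_cons_self) hp
      simp [hp, hx, ih']

theorem pvFindSome?_congr {α β : Type} (f g : α → Option β) (l : List α)
    (h : ∀ x ∈ l, f x = g x) : l.findSome? f = l.findSome? g := by
  induction l with
  | nil => rfl
  | cons x xs ih =>
    simp only [List.findSome?_cons, h x List.mem_cons_self,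
      ih (fun y hy => h y (List.mem_cons_of_mem _ hy))]

theorem pvFoldlMax_ge_acc (l : List (List Char)) (a : Nat) :
    a ≤ l.foldl (fun m k => max m k.length) a := by
  induction l generalizing a with
  | nil => exact Nat.le_refl a
  | cons x xs ih => exact Nat.le_trans (Nat.le_max_left a x.length) (ih _)

theorem pvMaxL_ge (keys : List (List Char)) (k : List Char) (h : k ∈ keys) :
    k.length ≤ pvMaxL keys := by
  unfold pvMaxL
  generalize (0 : Nat) = a
  induction keys generalizing a with
  | nil => cases h
  | cons x xs ih =>
    rcases List.mem_cons.1 h with rfl | hx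
    · exact Nat.le_trans (Nat.le_max_right a k.length) (pvFoldlMax_ge_acc xs _)
    · exact ih hx _

-- the two strictly-decreasing length lists coincide
theorem pvLists_eq (stripped : List Char) (keys : List (List Char)) (hnd : keys.Nodup) :
    ((PySem.List.sorted keys (fun k => k.length) true).filter
        (fun k => PySem.Chars.startswith stripped k)).map List.length
      = ((List.range (min stripped.length (pvMaxL keys) + 1)).reverse).filter
          (fun (L : Nat) => decide (stripped.take L ∈ keys)) := by
  set sk := PySem.List.sorted keys (fun k => k.length) true with hsk
  have hmemsk : ∀ x, x ∈ sk ↔ x ∈ keys := fun x => PySem.List.mem_sorted keys _ true x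
  have hndsk : sk.Nodup := ((PySem.List.sorted_perm keys (fun k => k.length) true).nodup_iff).2 hnd
  have hpair : sk.Pairwise (fun a b => b.length ≤ a.length) :=
    PySem.List.sorted_pairwise_rev keys (fun k => k.length)
  -- left side is strictly decreasing in length
  have hL : (sk.filter (fun k => PySem.Chars.startswith stripped k)).Pairwise
      (fun a b => b.length < a.length) := by
    have hcomb : sk.Pairwise (fun a b => a ≠ b ∧ b.length ≤ a.length) := hndsk.and hpair
    refine ((hcomb.filter _).imp_of_mem ?_)
    intro a b ha hb hab
    have ha' := (List.mem_filter.1 ha).2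
    have hb' := (List.mem_filter.1 hb).2
    have hpa : a <+: stripped := (PySem.Chars.startswith_iff _ _).1 (by simpa using ha')
    have hpb : b <+: stripped := (PySem.Chars.startswith_iff _ _).1 (by simpa using hb')
    rcases hab with ⟨hne, hle⟩
    rcases Nat.lt_or_ge b.length a.length with h | h
    · exact h
    · exfalso
      have : a.length = b.length := by omega
      apply hne
      calc a = stripped.take a.length := (List.prefix_iff_eq_take.1 hpa)
        _ = stripped.take b.length := by rw [this]
        _ = b := (List.prefix_iff_eq_take.1 hpb).symm
  have hLmap : ((sk.filter (fun k => PySem.Chars.startswith stripped k)).map List.length).Pairwise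
      (fun a b => (b : Nat) < a) := List.pairwise_map.2 hL
  have hRfil : (((List.range (min stripped.length (pvMaxL keys) + 1)).reverse).filter
      (fun (L : Nat) => decide (stripped.take L ∈ keys))).Pairwise (fun a b => b < a) := by
    have : ((List.range (min stripped.length (pvMaxL keys) + 1)).reverse).Pairwise (fun a b => b < a) :=
      (List.pairwise_reverse).2 (List.pairwise_lt_range)
    exact this.filter _
  -- same members
  have hmem : ∀ x, x ∈ ((sk.filter (fun k => PySem.Chars.startswith stripped k)).map List.length) ↔
      x ∈ (((List.range (min stripped.length (pvMaxL keys) + 1)).reverse).filter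
        (fun (L : Nat) => decide (stripped.take L ∈ keys))) := by
    intro x
    simp only [List.mem_map, List.mem_filter, List.mem_reverse, List.mem_range,
      decide_eq_true_eq]
    constructor
    · rintro ⟨k, ⟨hk, hsw⟩, rfl⟩
      have hpk : k <+: stripped := (PySem.Chars.startswith_iff _ _).1 (by simpa using hsw)
      have hk' : k ∈ keys := (hmemsk k).1 hk
      have hlen : k.length ≤ stripped.length := hpk.length_le
      have hml : k.length ≤ pvMaxL keys := pvMaxL_ge keys k hk'
      refine ⟨by omega, ?_⟩
      rw [← List.prefix_iff_eq_take.1 hpk]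
      exact hk'
    · rintro ⟨hlt, hmem'⟩
      refine ⟨stripped.take x, ⟨(hmemsk _).2 hmem', ?_⟩, ?_⟩
      · simpa using (PySem.Chars.startswith_iff _ _).2 (List.take_prefix x stripped)
      · simp
        omega
  -- two strictly decreasing lists with the same members are equal
  have hnd1 : ((sk.filter (fun k => PySem.Chars.startswith stripped k)).map List.length).Nodup :=
    hLmap.imp (fun h => Nat.ne_of_gt h)
  have hnd2 : (((List.range (min stripped.length (pvMaxL keys) + 1)).reverse).filter
      (fun (L : Nat) => decide (stripped.take L ∈ keys))).Nodup :=
    hRfil.imp (fun h => Nat.ne_of_gt h)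
  have hperm := (List.perm_ext_iff_of_nodup hnd1 hnd2).2 hmem
  exact List.Perm.eq_of_pairwise
    (fun a b _ _ hab hba => Nat.le_antisymm hba hab)
    (hLmap.imp (fun h => Nat.le_of_lt h))
    (hRfil.imp (fun h => Nat.le_of_lt h)) hperm

-- A's loop over sorted keys computes B's countdown (for any reconstruction `att` that agrees
-- with B's unified one on prefixes of `stripped`)
theorem pvLoop_eq (src stripped : List Char) (base keys : List (List Char))
    (att : List Char → Option (List Char)) (hnd : keys.Nodup)
    (hatt : ∀ p, p <+: stripped → att p = pvFix src p p.length) :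
    pvLoopA stripped base att (PySem.List.sorted keys (fun k => k.length) true)
      = pvScan src stripped base keys (min stripped.length (pvMaxL keys)) := by
  rw [pvLoopA_eq_findSome, pvScan_eq_findSome]
  set sk := PySem.List.sorted keys (fun k => k.length) true with hsk
  have hmemsk : ∀ x, x ∈ sk ↔ x ∈ keys := fun x => PySem.List.mem_sorted keys _ true x
  rw [pvFindSome?_filter (pvTryA stripped base att) (fun k => PySem.Chars.startswith stripped k) sk
    (by intro k _ hk; simp [pvTryA, hk])]
  rw [pvFindSome?_filter (pvStep src stripped base keys)
    (fun (L : Nat) => decide (stripped.take L ∈ keys))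
    ((List.range (min stripped.length (pvMaxL keys) + 1)).reverse)
    (by
      intro L _ hL
      simp only [decide_eq_false_iff_not] at hL
      simp [pvStep, hL])]
  rw [← pvLists_eq stripped keys hnd, List.findSome?_map]
  apply pvFindSome?_congr
  intro k hk
  have hsw : PySem.Chars.startswith stripped k = true := (List.mem_filter.1 hk).2
  have hkk : k ∈ keys := (hmemsk k).1 (List.mem_filter.1 hk).1
  have hpk : k <+: stripped := (PySem.Chars.startswith_iff _ _).1 hsw
  have htake : stripped.take k.length = k := (List.prefix_iff_eq_take.1 hpk).symm
  have hdrop : PySem.List.slice stripped (some ((k.length : Nat) : Int)) none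
      = stripped.drop k.length := PySem.List.slice_from_natCast _ _
  simp only [Function.comp, pvTryA, pvStep, htake, hdrop, hsw, if_true, hkk, true_and,
    hatt k hpk, pvFix]

-- A's and B's reconstructions compute the same `preserved`
theorem pvRecon1_eq (after p : List Char) : pvReconA1 after p = pvFix after p p.length := by
  simp only [pvReconA1, pvFix]
  by_cases hidx : PySem.Chars.find after p = -1
  · simp [hidx]
  · have hge : 0 ≤ PySem.Chars.find after p := by
      have := PySem.Chars.neg_one_le_find after p
      omega
    simp only [hidx, ne_eq, not_false_iff, if_true]
    have h1 : PySem.List.slice after none (some (0 : Int)) = ([] : List Char) := by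
      simpa using PySem.List.slice_to_natCast after 0
    have h2 : PySem.List.slice after none (some (PySem.Chars.find after p))
        = after.take (PySem.Chars.find after p).toNat := PySem.List.slice_to after hge
    have h3 : PySem.List.slice after (some (PySem.Chars.find after p + (p.length : Int))) none
        = after.drop ((PySem.Chars.find after p).toNat + p.length) := by
      rw [PySem.List.slice_from after (by omega)]
      congr 1
      omega
    have h4 : PySem.List.pyGet? after 0 = after.head? := by
      have : PySem.List.pyGet? after ((0 : Nat) : Int) = after[(0 : Nat)]? :=
        PySem.List.pyGet?_natCast after 0
      simpa [List.head?_eq_getElem?] using this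
    rw [h1, h2, h3, h4]
    simp

theorem pvRecon2_eq (tok p : List Char) : pvReconA2 tok p = pvFix tok p p.length := by
  simp only [pvReconA2, pvFix]
  by_cases hidx : PySem.Chars.find tok p = -1
  · simp [hidx]
  · have hge : 0 ≤ PySem.Chars.find tok p := by
      have := PySem.Chars.neg_one_le_find tok p
      omega
    simp only [hidx, ne_eq, not_false_iff, if_true]
    have h2 : PySem.List.slice tok none (some (PySem.Chars.find tok p))
        = tok.take (PySem.Chars.find tok p).toNat := PySem.List.slice_to tok hge
    have h3 : PySem.List.slice tok (some (PySem.Chars.find tok p + (p.length : Int))) none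
        = tok.drop ((PySem.Chars.find tok p).toNat + p.length) := by
      rw [PySem.List.slice_from tok (by omega)]
      congr 1
      omega
    by_cases h1 : PySem.Chars.find tok p = 1
    · have hget : PySem.List.pyGet? tok (PySem.Chars.find tok p - 1) = tok.head? := by
        rw [h1]
        have : PySem.List.pyGet? tok ((0 : Nat) : Int) = tok[(0 : Nat)]? :=
          PySem.List.pyGet?_natCast tok 0
        simpa [List.head?_eq_getElem?] using this
      by_cases hsp : tok.head? = some ' '
      · have hslice0 : PySem.List.slice tok none (some (0 : Int)) = ([] : List Char) := by
          simpa using PySem.List.slice_to_natCast tok 0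
        rw [h2, h3, hget, hslice0]
        simp [h1, hsp]
      · rw [h2, h3, hget]
        simp [h1, hsp]
    · -- idx ≠ 1: both sides are the plain splice
      rw [h2, h3]
      have hnot : ¬ (PySem.Chars.find tok p = 1 ∧ tok.head? = some ' ') := by
        intro h; exact h1 h.1
      rw [if_neg hnot]
      by_cases hgt : PySem.Chars.find tok p > 0 ∧ PySem.List.pyGet? tok (PySem.Chars.find tok p - 1) = some ' '
      · rw [if_pos hgt, if_neg h1]
      · rw [if_neg hgt]

theorem pvKeys_nodup (multipliers_dict : List (String × String)) :
    (((PySem.Dict.ofList multipliers_dict).keys).map String.toList).Nodup := by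
  refine (PySem.Dict.nodup_keys_ofList multipliers_dict).map ?_
  intro a b h
  exact String.toList_inj.mp h

theorem pvSW_dollar (tok : List Char) :
    PySem.Chars.startswith tok ['$'] = (tok.head? == some '$') := by
  cases tok with
  | nil => decide
  | cons c cs =>
    simp only [List.head?_cons]
    by_cases h : c = '$'
    · subst h
      have h1 : PySem.Chars.startswith ('$' :: cs) ['$'] = true :=
        (PySem.Chars.startswith_iff _ _).2 ⟨cs, rfl⟩
      simp [h1]
    · have h1 : PySem.Chars.startswith (c :: cs) ['$'] = false := by
        cases hsw : PySem.Chars.startswith (c :: cs) ['$'] with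
        | false => rfl
        | true =>
          rcases (PySem.Chars.startswith_iff _ _).1 hsw with ⟨t, ht⟩
          simp only [List.singleton_append, List.cons.injEq] at ht
          exact absurd ht.1.symm h
      simp [h1, h]

theorem pvDollar_cons (r : List Char) : String.ofList ('$' :: r) = "$" ++ String.ofList r := by
  apply String.toList_inj.mp
  simp

theorem pvErr_eq (s : List Char) :
    pvErr s = "Error: Undefined unit '" ++ String.ofList s ++ "' (no recognized prefix)" := by
  apply String.toList_inj.mp
  simp [pvErr]

-- ===== VERDICT (by name: the statement is the Claim_ definition above) =====
theorem process_unit_token_no_paren_spec : Claim_equal_process_unit_token_no_paren := by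
  intro token base_units multipliers_dict _
  unfold Spec_process_unit_token_no_paren
  simp only [process_unit_token_no_paren, process_unit_token_no_paren_alt, pvFinish]
  have hnd := pvKeys_nodup multipliers_dict
  set tok := token.toList
  set base := base_units.map String.toList
  set keys := ((PySem.Dict.ofList multipliers_dict).keys).map String.toList
  rw [pvSW_dollar]
  by_cases hd : tok.head? = some '$'
  · simp only [hd, beq_self_eq_true, if_true]
    have hafter : PySem.List.slice tok (some 1) none = tok.tail := PySem.List.slice_from_one tok
    rw [hafter]
    set src := tok.tail
    set stripped := PySem.Chars.strip src
    rw [pvLoop_eq src stripped base keys (pvReconA1 src) hnd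
      (fun p _ => pvRecon1_eq src p)]
    by_cases he : stripped = []
    · simp [he]
    · simp only [he, List.isEmpty_iff, if_false]
      by_cases hb : stripped ∈ base
      · simp [hb, pvDollar_cons]
      · simp only [hb, if_false]
        cases pvScan src stripped base keys stripped.length <;>
          simp [pvDollar_cons, pvErr_eq]
  · have : (tok.head? == some '$') = false := by simpa using hd
    simp only [this, if_false, Bool.false_eq_true]
    rw [if_neg hd]
    set stripped := PySem.Chars.strip tok
    rw [pvLoop_eq tok stripped base keys (pvReconA2 tok) hnd
      (fun p _ => pvRecon2_eq tok p)]
    by_cases hb : stripped ∈ base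
    · simp [hb, pvDollar_cons]
    · simp only [hb, if_false]
      cases pvScan tok stripped base keys stripped.length <;>
        simp [pvDollar_cons, pvErr_eq]
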